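-- pv_equiv track=rewrite | github.com/SnipersRUs/SnipersRUs | bottom_scanner_enhanced.py | is_forex_pair
-- ===== SOURCE A (Python) =====
-- def is_forex_pair(symbol: str) -> bool:
--     """Check if symbol is a forex pair"""
--     base = symbol.split('/')[0].split(':')[0].upper()
--     forex_codes = {
--         'EUR', 'GBP', 'JPY', 'AUD', 'CAD', 'CHF', 'CNY', 'NZD', 'SEK', 'NOK',
--         'DKK', 'SGD', 'HKD', 'KRW', 'MXN', 'BRL', 'ZAR', 'INR', 'RUB', 'TRY',
--         'PLN', 'CZK', 'HUF', 'RON', 'BGN', 'HRK', 'XAU', 'XAG', 'XPD', 'XPT', 'XDR'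
--     }
--     if base in forex_codes or ('USDT' not in base and any(base.startswith(fx) for fx in forex_codes)):
--         return True
--     return False
-- ===== SOURCE B (Python) =====
-- _FOREX_CODES = frozenset({
--     'EUR', 'GBP', 'JPY', 'AUD', 'CAD', 'CHF', 'CNY', 'NZD', 'SEK', 'NOK',
--     'DKK', 'SGD', 'HKD', 'KRW', 'MXN', 'BRL', 'ZAR', 'INR', 'RUB', 'TRY',
--     'PLN', 'CZK', 'HUF', 'RON', 'BGN', 'HRK', 'XAU', 'XAG', 'XPD', 'XPT', 'XDR'
-- })
--
--
-- def is_forex_pair(symbol: str) -> bool: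
--     """Check if symbol is a forex pair"""
--     # one scan to the first separator instead of two split passes
--     i = 0
--     while i < len(symbol) and symbol[i] != '/' and symbol[i] != ':':
--         i += 1
--     base = symbol[:i].upper()
--     # every forex code is exactly 3 chars, so one 3-char-prefix lookup
--     # replaces both the exact-membership test and the startswith scan
--     return base[:3] in _FOREX_CODES and 'USDT' not in base
-- ===== Notes on version B (the rewrite author's own statement) =====
-- stated objective: simpler
-- what changed: B replaces A's two split passes and the per-code startswith generator scan by a single scan to the first separator character and one 3-char-prefix set lookup (every forex code has length 3, and a 3-char base can never contain the stablecoin suffix).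
import Mathlib
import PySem

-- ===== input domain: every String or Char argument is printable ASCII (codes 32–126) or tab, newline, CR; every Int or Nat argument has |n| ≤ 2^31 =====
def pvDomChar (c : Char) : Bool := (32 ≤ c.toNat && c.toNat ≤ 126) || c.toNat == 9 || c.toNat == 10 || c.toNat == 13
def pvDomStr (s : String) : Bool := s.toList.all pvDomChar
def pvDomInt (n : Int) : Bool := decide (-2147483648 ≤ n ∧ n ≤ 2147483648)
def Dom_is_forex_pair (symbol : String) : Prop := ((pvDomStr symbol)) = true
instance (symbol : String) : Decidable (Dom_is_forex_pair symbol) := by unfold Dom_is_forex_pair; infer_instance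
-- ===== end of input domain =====

-- B replaces A's two split passes and the startswith generator scan by one scan to the first
-- separator character and a single 3-char-prefix set lookup (objective: simpler; not timed faster).

-- ===== PORT A =====

-- the Python set literal forex_codes (any/membership only: order-independent uses)
def forexCodes : PySem.Set (List Char) := PySem.Set.ofList
  ["EUR".toList, "GBP".toList, "JPY".toList, "AUD".toList, "CAD".toList, "CHF".toList,
   "CNY".toList, "NZD".toList, "SEK".toList, "NOK".toList, "DKK".toList, "SGD".toList,
   "HKD".toList, "KRW".toList, "MXN".toList, "BRL".toList, "ZAR".toList, "INR".toList,
   "RUB".toList, "TRY".toList, "PLN".toList, "CZK".toList, "HUF".toList, "RON".toList,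
   "BGN".toList, "HRK".toList, "XAU".toList, "XAG".toList, "XPD".toList, "XPT".toList,
   "XDR".toList]

-- Python's s.split(sep) always returns a nonempty list, so `[0]` never raises; headD [] is exact there.
def is_forex_pair (symbol : String) : Bool :=
  let base := PySem.Chars.upper
    ((PySem.Chars.splitOn ((PySem.Chars.splitOn symbol.toList "/".toList).headD []) ":".toList).headD [])
  if PySem.Set.contains forexCodes base
      || (!PySem.Chars.isIn "USDT".toList base
          && forexCodes.any (fun fx => PySem.Chars.startswith base fx)) then
    true
  else
    false

-- ===== PORT B =====

-- Source B's index loop up to the first separator, together with symbol[:i],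
-- as the obvious structural recursion producing that prefix
def takeBaseB : List Char → List Char
  | [] => []
  | c :: cs => if c = '/' || c = ':' then [] else c :: takeBaseB cs

def is_forex_pair_alt (symbol : String) : Bool :=
  let base := PySem.Chars.upper (takeBaseB symbol.toList)
  PySem.Set.contains forexCodes (PySem.List.slice base none (some 3))
    && !PySem.Chars.isIn "USDT".toList base

-- ===== PRECONDITION & SPEC =====
def Spec_is_forex_pair (symbol : String) (out : Bool) : Prop := out = is_forex_pair_alt symbol
instance (symbol : String) (out : Bool) : Decidable (Spec_is_forex_pair symbol out) := by unfold Spec_is_forex_pair; infer_instance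

-- ===== CLAIM (what is proved, stated in full; the proofs are below) =====
def Claim_equal_is_forex_pair : Prop := ∀ (symbol : String), Dom_is_forex_pair symbol → Spec_is_forex_pair symbol (is_forex_pair symbol)

-- ===== LEMMAS AND PROOFS =====

-- unfolding equations for splitOn's fuel loop (definitional)
theorem go_zero (c : Char) (l cur : List Char) (acc : List (List Char)) :
    PySem.Chars.splitOn.go [c] 0 l cur acc = ((cur.reverse ++ l) :: acc).reverse := rfl

theorem go_nil (c : Char) (cur : List Char) (acc : List (List Char)) (n : Nat) :
    PySem.Chars.splitOn.go [c] (n+1) [] cur acc = (cur.reverse :: acc).reverse := rfl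

theorem go_cons (c x : Char) (rest cur : List Char) (acc : List (List Char)) (n : Nat) :
    PySem.Chars.splitOn.go [c] (n+1) (x :: rest) cur acc =
      if [c].isPrefixOf (x :: rest) then
        PySem.Chars.splitOn.go [c] n (List.drop [c].length (x :: rest)) [] (cur.reverse :: acc)
      else PySem.Chars.splitOn.go [c] n rest (x :: cur) acc := rfl

-- once a separator has been pushed, the head of splitOn.go's result is the last element of acc
theorem go_headD_append (c : Char) (fuel : Nat) (l cur : List Char)
    (acc : List (List Char)) (a : List Char) :
    (PySem.Chars.splitOn.go [c] fuel l cur (acc ++ [a])).headD [] = a := by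
  induction fuel generalizing l cur acc with
  | zero => rw [go_zero]; simp
  | succ n ih =>
    cases l with
    | nil => rw [go_nil]; simp
    | cons x rest =>
      rw [go_cons]
      by_cases hx : [c].isPrefixOf (x :: rest) = true
      · rw [if_pos hx]
        have := ih (List.drop [c].length (x :: rest)) [] (cur.reverse :: acc)
        simpa using this
      · rw [if_neg hx]
        exact ih rest (x :: cur) acc

-- before any separator, splitOn.go's head is the takeWhile-prefix
theorem go_headD (c : Char) (fuel : Nat) (l cur : List Char) (h : l.length < fuel) :
    (PySem.Chars.splitOn.go [c] fuel l cur []).headD []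
      = cur.reverse ++ l.takeWhile (fun x => x ≠ c) := by
  induction fuel generalizing l cur with
  | zero => omega
  | succ n ih =>
    cases l with
    | nil => rw [go_nil]; simp
    | cons x rest =>
      rw [go_cons]
      by_cases hx : [c].isPrefixOf (x :: rest) = true
      · have hxc : x = c := by
          have h' := hx
          simp [List.isPrefixOf] at h'
          exact h'.symm
        rw [if_pos hx]
        have := go_headD_append c n (List.drop [c].length (x :: rest)) [] [] cur.reverse
        simp only [List.nil_append] at this
        rw [this]
        simp [hxc]
      · have hxc : ¬ x = c := by
          intro hcontra
          exact hx (by simp [List.isPrefixOf, hcontra])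
        rw [if_neg hx, ih rest (x :: cur) (by simpa using Nat.lt_of_succ_lt_succ h)]
        simp [hxc]

theorem splitOn_headD (s : List Char) (c : Char) :
    (PySem.Chars.splitOn s [c]).headD [] = s.takeWhile (fun x => x ≠ c) := by
  unfold PySem.Chars.splitOn
  simpa using go_headD c (s.length + 1) s [] (by omega)

-- the two split passes of A compute B's single scan to the first separator
theorem base_eq (s : List Char) :
    ((PySem.Chars.splitOn ((PySem.Chars.splitOn s "/".toList).headD []) ":".toList).headD [])
      = takeBaseB s := by
  have h1 : "/".toList = ['/'] := rfl
  have h2 : ":".toList = [':'] := rfl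
  rw [h1, h2, splitOn_headD, splitOn_headD]
  induction s with
  | nil => rfl
  | cons x rest ih =>
    by_cases hx : x = '/'
    · simp [takeBaseB, hx]
    · by_cases hx2 : x = ':'
      · simp [takeBaseB, hx2]
      · simp only [takeBaseB, List.takeWhile_cons, hx, hx2, ne_eq, decide_not,
          decide_false, Bool.not_false, if_true, Bool.or_false]
        simp only [ne_eq, decide_not] at ih
        simp [ih]

theorem codes_len : ∀ fx ∈ (forexCodes : List (List Char)), fx.length = 3 := by decide

-- the boolean condition: for ANY candidate base, A's test equals B's test
theorem cond_eq (b : List Char) :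
    (PySem.Set.contains forexCodes b
        || (!PySem.Chars.isIn "USDT".toList b
            && forexCodes.any (fun fx => PySem.Chars.startswith b fx)))
      = (PySem.Set.contains forexCodes (PySem.List.slice b none (some 3))
          && !PySem.Chars.isIn "USDT".toList b) := by
  have hslice : PySem.List.slice b none (some 3) = b.take 3 := by simp [pysem]
  have hany : forexCodes.any (fun fx => PySem.Chars.startswith b fx)
      = decide (b.take 3 ∈ (forexCodes : List (List Char))) := by
    rw [Bool.eq_iff_iff, List.any_eq_true, decide_eq_true_iff]
    constructor
    · rintro ⟨fx, hfx, hsw⟩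
      have hpre : fx <+: b := (PySem.Chars.startswith_iff b fx).mp hsw
      have hfx3 : fx = b.take fx.length := List.prefix_iff_eq_take.mp hpre
      rw [codes_len fx hfx] at hfx3
      rwa [← hfx3]
    · intro hmem
      exact ⟨b.take 3, hmem, (PySem.Chars.startswith_iff b (b.take 3)).mpr (List.take_prefix 3 b)⟩
  by_cases hmem : b ∈ (forexCodes : List (List Char))
  · have hb3 : b.take 3 = b := List.take_of_length_le (by rw [codes_len b hmem])
    have hin : PySem.Chars.isIn ['U', 'S', 'D', 'T'] b = false := by
      rw [PySem.Chars.isIn_eq_false_iff]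
      intro hinf
      have hle := hinf.length_le
      rw [codes_len b hmem] at hle
      simp at hle
    simp [PySem.Set.contains, hslice, hb3, hmem, hin]
  · simp [PySem.Set.contains, hslice, hany, hmem, Bool.and_comm]

-- ===== VERDICT (by name: the statement is the Claim_ definition above) =====
theorem is_forex_pair_spec : Claim_equal_is_forex_pair := by
  intro symbol _
  unfold Spec_is_forex_pair is_forex_pair is_forex_pair_alt
  simp only [base_eq, cond_eq]
  split <;> simp_all
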